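-- pv_equiv track=rewrite | github.com/pypi-data/pypi-mirror-404 | packages/gsobench/gsobench-0.1.4-py3-none-any.whl/gso/collect/utils.py | prepare_install_commands
-- ===== SOURCE A (Python) =====
-- def prepare_install_commands(install_commands: list[str]) -> list[str]:
--     """Clean and prepare install commands for a problem instance"""
--     # remove any sudo commands
--     install_commands = [cmd for cmd in install_commands if not cmd.startswith("sudo")]
--
--     # remove any token exports
--     install_commands = [
--         cmd for cmd in install_commands if not cmd.startswith("export HF_TOKEN=")
--     ]
--
--     # special case: onnxruntime
--     install_commands = [
--         (
--             cmd + " --allow_running_as_root"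
--             if cmd.startswith("./build.sh --config RelWithDebInfo")
--             else cmd
--         )
--         for cmd in install_commands
--     ]
--
--     # special case: pillow-simd
--     install_commands = [
--         cmd for cmd in install_commands if not cmd == "uv pip show pillow-simd"
--     ]
--
--     return install_commands
-- ===== SOURCE B (Python) =====
-- def prepare_install_commands(install_commands: list[str]) -> list[str]:
--     """Clean and prepare install commands for a problem instance"""
--     result = []
--     for cmd in install_commands:
--         if cmd.startswith("sudo") or cmd.startswith("export HF_TOKEN=") or cmd == "uv pip show pillow-simd":
--             continue
--         if cmd.startswith("./build.sh --config RelWithDebInfo"):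
--             result.append(cmd + " --allow_running_as_root")
--         else:
--             result.append(cmd)
--     return result
-- ===== Notes on version B (the rewrite author's own statement) =====
-- stated objective: simpler
-- what changed: Fused A's four sequential list passes (two filters, a map, another filter) into one explicit loop that skips or rewrites each command in a single traversal.
import Mathlib
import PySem

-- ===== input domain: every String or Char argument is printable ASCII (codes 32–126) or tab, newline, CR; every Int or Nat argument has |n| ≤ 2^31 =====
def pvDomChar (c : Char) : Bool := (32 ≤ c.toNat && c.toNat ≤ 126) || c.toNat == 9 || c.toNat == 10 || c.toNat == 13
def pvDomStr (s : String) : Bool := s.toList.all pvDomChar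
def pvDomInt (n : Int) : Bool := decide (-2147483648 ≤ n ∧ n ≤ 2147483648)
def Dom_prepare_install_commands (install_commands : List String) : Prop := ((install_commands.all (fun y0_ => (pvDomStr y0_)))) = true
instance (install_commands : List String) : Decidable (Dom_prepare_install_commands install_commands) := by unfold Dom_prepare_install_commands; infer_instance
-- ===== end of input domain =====

-- B fuses A's four sequential list passes into one explicit loop over the commands (objective: simpler).


-- ===== PORT A =====
-- Literal transliteration of A: four successive comprehensions (filter, filter, map, filter).
def prepare_install_commands (install_commands : List String) : List String :=
  let l1 := install_commands.filter (fun cmd => !(PySem.Str.startswith cmd "sudo"))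
  let l2 := l1.filter (fun cmd => !(PySem.Str.startswith cmd "export HF_TOKEN="))
  let l3 := l2.map (fun cmd =>
    if PySem.Str.startswith cmd "./build.sh --config RelWithDebInfo" then
      cmd ++ " --allow_running_as_root" else cmd)
  l3.filter (fun cmd => !(cmd == "uv pip show pillow-simd"))

-- ===== PORT B =====
-- B: one explicit loop with an accumulator (skip or rewrite each command in a single pass).
def prepare_install_commands_alt (install_commands : List String) : List String :=
  (install_commands.foldl (fun result cmd =>
    if PySem.Str.startswith cmd "sudo" || PySem.Str.startswith cmd "export HF_TOKEN="
        || cmd == "uv pip show pillow-simd" then result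
    else if PySem.Str.startswith cmd "./build.sh --config RelWithDebInfo" then
      result ++ [cmd ++ " --allow_running_as_root"]
    else result ++ [cmd]) [])

-- ===== PRECONDITION & SPEC =====
def Spec_prepare_install_commands (install_commands : List String) (out : List String) : Prop := out = prepare_install_commands_alt install_commands
instance (install_commands : List String) (out : List String) : Decidable (Spec_prepare_install_commands install_commands out) := by unfold Spec_prepare_install_commands; infer_instance

-- ===== CLAIM (what is proved, stated in full; the proofs are below) =====
def Claim_equal_prepare_install_commands : Prop := ∀ (install_commands : List String), Dom_prepare_install_commands install_commands → Spec_prepare_install_commands install_commands (prepare_install_commands install_commands)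

-- ===== LEMMAS AND PROOFS =====

-- ===== LEMMAS
lemma build_append_ne (c : String)
    (h : PySem.Chars.startswith c.toList ['.', '/', 'b', 'u', 'i', 'l', 'd', '.', 's', 'h', ' ', '-', '-', 'c', 'o', 'n', 'f', 'i', 'g', ' ', 'R', 'e', 'l', 'W', 'i', 't', 'h', 'D', 'e', 'b', 'I', 'n', 'f', 'o'] = true) :
    c ++ " --allow_running_as_root" ≠ "uv pip show pillow-simd" := by
  intro he
  rw [PySem.Chars.startswith_iff] at h
  obtain ⟨r, hr⟩ := h
  have h2 : (c ++ " --allow_running_as_root").toList = "uv pip show pillow-simd".toList := by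
    rw [he]
  rw [String.toList_append, ← hr] at h2
  simp at h2

lemma A_cons (c : String) (t : List String) :
    prepare_install_commands (c :: t) =
      (if PySem.Str.startswith c "sudo" || PySem.Str.startswith c "export HF_TOKEN="
          || c == "uv pip show pillow-simd" then []
       else if PySem.Str.startswith c "./build.sh --config RelWithDebInfo" then
         [c ++ " --allow_running_as_root"]
       else [c]) ++ prepare_install_commands t := by
  by_cases h4 : PySem.Chars.startswith c.toList ['.', '/', 'b', 'u', 'i', 'l', 'd', '.', 's', 'h', ' ', '-', '-', 'c', 'o', 'n', 'f', 'i', 'g', ' ', 'R', 'e', 'l', 'W', 'i', 't', 'h', 'D', 'e', 'b', 'I', 'n', 'f', 'o'] = true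
  · have h3 : c ≠ "uv pip show pillow-simd" := by
      intro he
      rw [he] at h4
      exact absurd h4 (by decide)
    have h5 := build_append_ne c h4
    by_cases h1 : PySem.Chars.startswith c.toList ['s', 'u', 'd', 'o'] = true <;>
    by_cases h2 : PySem.Chars.startswith c.toList ['e', 'x', 'p', 'o', 'r', 't', ' ', 'H', 'F', '_', 'T', 'O', 'K', 'E', 'N', '='] = true <;>
    simp [prepare_install_commands, List.map_cons, h1, h2, h3, h4, h5]
  · by_cases h3 : c = "uv pip show pillow-simd"
    · have e1 : PySem.Chars.startswith ['u', 'v', ' ', 'p', 'i', 'p', ' ', 's', 'h', 'o', 'w', ' ', 'p', 'i', 'l', 'l', 'o', 'w', '-', 's', 'i', 'm', 'd'] ['s', 'u', 'd', 'o'] = false := by decide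
      have e2 : PySem.Chars.startswith ['u', 'v', ' ', 'p', 'i', 'p', ' ', 's', 'h', 'o', 'w', ' ', 'p', 'i', 'l', 'l', 'o', 'w', '-', 's', 'i', 'm', 'd'] ['e', 'x', 'p', 'o', 'r', 't', ' ', 'H', 'F', '_', 'T', 'O', 'K', 'E', 'N', '='] = false := by decide
      have e3 : PySem.Chars.startswith ['u', 'v', ' ', 'p', 'i', 'p', ' ', 's', 'h', 'o', 'w', ' ', 'p', 'i', 'l', 'l', 'o', 'w', '-', 's', 'i', 'm', 'd'] ['.', '/', 'b', 'u', 'i', 'l', 'd', '.', 's', 'h', ' ', '-', '-', 'c', 'o', 'n', 'f', 'i', 'g', ' ', 'R', 'e', 'l', 'W', 'i', 't', 'h', 'D', 'e', 'b', 'I', 'n', 'f', 'o'] = false := by decide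
      subst h3
      simp [prepare_install_commands, List.map_cons, e1, e2, e3]
    · by_cases h1 : PySem.Chars.startswith c.toList ['s', 'u', 'd', 'o'] = true <;>
      by_cases h2 : PySem.Chars.startswith c.toList ['e', 'x', 'p', 'o', 'r', 't', ' ', 'H', 'F', '_', 'T', 'O', 'K', 'E', 'N', '='] = true <;>
      simp [prepare_install_commands, List.map_cons, h1, h2, h3, h4]

lemma alt_go (l : List String) (acc : List String) :
    l.foldl (fun result cmd =>
      if PySem.Str.startswith cmd "sudo" || PySem.Str.startswith cmd "export HF_TOKEN="
          || cmd == "uv pip show pillow-simd" then result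
      else if PySem.Str.startswith cmd "./build.sh --config RelWithDebInfo" then
        result ++ [cmd ++ " --allow_running_as_root"]
      else result ++ [cmd]) acc
    = acc ++ prepare_install_commands l := by
  induction l generalizing acc with
  | nil => simp [prepare_install_commands]
  | cons c t ih =>
    rw [List.foldl_cons, ih, A_cons]
    by_cases h1 : (PySem.Str.startswith c "sudo" || PySem.Str.startswith c "export HF_TOKEN="
        || c == "uv pip show pillow-simd") = true
    · rw [if_pos h1, if_pos h1]; simp
    · rw [if_neg h1, if_neg h1]
      by_cases h4 : PySem.Str.startswith c "./build.sh --config RelWithDebInfo" = true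
      · rw [if_pos h4, if_pos h4]; simp
      · rw [if_neg h4, if_neg h4]; simp

-- ===== VERDICT (by name: the statement is the Claim_ definition above) =====
theorem prepare_install_commands_spec : Claim_equal_prepare_install_commands := by
  intro l _
  show prepare_install_commands l = prepare_install_commands_alt l
  rw [prepare_install_commands_alt, alt_go]
  simp
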